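-- pv_equiv track=rewrite | github.com/floriandotpy/advent-of-code-2020 | day-16/day-16.py | determine_fields
-- ===== SOURCE A (Python) =====
-- def in_interval(num, interval):
--     start, end = interval
--     return start <= num <= end
--
-- def determine_fields(numbers, rules):
--     fields = set()
--     for rule_name, (interval_1, interval_2) in rules.items():
--         if all(
--             in_interval(num, interval_1)
--             or in_interval(num, interval_2)
--             for num in numbers
--             ):
--             fields.add(rule_name)
--     return fields
-- ===== SOURCE B (Python) =====
-- def determine_fields(numbers, rules):
--     # Candidate elimination: start from all rules, each number knocks out
--     # the rules whose two intervals both miss it.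
--     candidates = list(rules.items())
--     for num in numbers:
--         candidates = [
--             (name, intervals)
--             for name, intervals in candidates
--             if intervals[0][0] <= num <= intervals[0][1]
--             or intervals[1][0] <= num <= intervals[1][1]
--         ]
--     return {name for name, _ in candidates}
-- ===== Notes on version B (the rewrite author's own statement) =====
-- stated objective: alternative
-- what changed: Replaces the per-rule all(numbers) test with candidate elimination: a shrinking candidate list driven by a loop over the numbers, each number filtering out rules whose intervals both miss it.
import Mathlib
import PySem

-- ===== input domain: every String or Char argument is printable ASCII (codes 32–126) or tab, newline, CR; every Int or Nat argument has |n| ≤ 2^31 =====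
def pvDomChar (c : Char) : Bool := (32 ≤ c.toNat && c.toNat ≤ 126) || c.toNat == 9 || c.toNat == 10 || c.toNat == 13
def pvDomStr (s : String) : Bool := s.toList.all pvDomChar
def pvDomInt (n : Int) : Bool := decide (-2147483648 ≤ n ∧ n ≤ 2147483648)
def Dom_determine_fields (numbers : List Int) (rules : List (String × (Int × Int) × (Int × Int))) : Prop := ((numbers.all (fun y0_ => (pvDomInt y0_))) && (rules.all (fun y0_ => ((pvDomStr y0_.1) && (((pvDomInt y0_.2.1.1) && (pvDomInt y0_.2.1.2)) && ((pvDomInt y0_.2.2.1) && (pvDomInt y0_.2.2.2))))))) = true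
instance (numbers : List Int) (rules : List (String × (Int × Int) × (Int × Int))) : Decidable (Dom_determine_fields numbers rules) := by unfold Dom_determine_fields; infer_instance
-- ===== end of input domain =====

-- B: same result via candidate elimination over the numbers instead of a per-rule all() test (objective: alternative decomposition, same cost).
-- ===== PORT A =====
def pvInInterval (num : Int) (interval : Int × Int) : Bool :=
  decide (interval.1 ≤ num) && decide (num ≤ interval.2)

def determine_fields (numbers : List Int) (rules : List (String × (Int × Int) × (Int × Int))) : List String :=
  rules.foldl
    (fun fields r =>
      if numbers.all (fun num => pvInInterval num r.2.1 || pvInInterval num r.2.2) then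
        PySem.Set.add fields r.1
      else fields)
    PySem.Set.empty

-- ===== PORT B =====
def determine_fields_alt (numbers : List Int) (rules : List (String × (Int × Int) × (Int × Int))) : List String :=
  let survivors :=
    numbers.foldl
      (fun cands num =>
        cands.filter (fun r =>
          (decide (r.2.1.1 ≤ num) && decide (num ≤ r.2.1.2)) ||
          (decide (r.2.2.1 ≤ num) && decide (num ≤ r.2.2.2))))
      rules
  PySem.Set.ofList (survivors.map Prod.fst)

-- ===== PRECONDITION & SPEC =====
def Spec_determine_fields (numbers : List Int) (rules : List (String × (Int × Int) × (Int × Int))) (out : List String) : Prop := out = determine_fields_alt numbers rules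
instance (numbers : List Int) (rules : List (String × (Int × Int) × (Int × Int))) (out : List String) : Decidable (Spec_determine_fields numbers rules out) := by unfold Spec_determine_fields; infer_instance

-- ===== CLAIM (what is proved, stated in full; the proofs are below) =====
def Claim_equal_determine_fields : Prop := ∀ (numbers : List Int) (rules : List (String × (Int × Int) × (Int × Int))), Dom_determine_fields numbers rules → Spec_determine_fields numbers rules (determine_fields numbers rules)

-- ===== LEMMAS AND PROOFS =====
-- B's elimination loop over the numbers equals one filter by the all-numbers predicate.
theorem pv_foldl_filter {α : Type} (p : Int → α → Bool) :
    ∀ (numbers : List Int) (l : List α),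
      numbers.foldl (fun c n => c.filter (p n)) l
        = l.filter (fun r => numbers.all (fun n => p n r)) := by
  intro numbers
  induction numbers with
  | nil => intro l; simp
  | cons n ns ih =>
    intro l
    simp only [List.foldl_cons, ih, List.filter_filter, List.all_cons]
    congr 1
    funext r
    cases p n r <;> simp

-- A's conditional Set.add fold equals Set.ofList of the filtered rules' names.
theorem pv_foldl_add {α β : Type} [BEq β] (P : α → Bool) (f : α → β) :
    ∀ (rules : List α) (s : PySem.Set β),
      rules.foldl (fun fields r => if P r then PySem.Set.add fields (f r) else fields) s
        = ((rules.filter P).map f).foldl PySem.Set.add s := by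
  intro rules
  induction rules with
  | nil => intro s; rfl
  | cons r rs ih =>
    intro s
    by_cases h : P r = true
    · simp [h, ih]
    · simp [h, ih]

-- ===== VERDICT (by name: the statement is the Claim_ definition above) =====
theorem determine_fields_spec : Claim_equal_determine_fields := by
  intro numbers rules _
  unfold Spec_determine_fields determine_fields determine_fields_alt
  rw [pv_foldl_filter, PySem.Set.ofList_eq_foldl, ← pv_foldl_add]
  simp [pvInInterval, PySem.Set.empty]
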